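-- pv_equiv track=rewrite | github.com/Ramsurya2005/Municipal_Waste_bot | smart_chatbot.py | _detect_department
-- ===== SOURCE A (Python) =====
-- def _detect_department(text):
--     """Detect department from text"""
--     if any(word in text for word in ['road', 'pothole', 'street', 'pavement']):
--         return 'Public Works'
--     elif any(word in text for word in ['water', 'leak', 'pipe', 'supply']):
--         return 'Water Supply'
--     elif any(word in text for word in ['garbage', 'trash', 'waste', 'cleanliness']):
--         return 'Sanitation'
--     elif any(word in text for word in ['light', 'streetlight', 'electricity', 'lamp']):
--         return 'Electrical'
--     elif any(word in text for word in ['drainage', 'sewer', 'flood', 'manhole']):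
--         return 'Drainage'
--     elif any(word in text for word in ['park', 'garden', 'playground']):
--         return 'Parks'
--     elif any(word in text for word in ['health', 'mosquito', 'disease']):
--         return 'Health'
--     elif any(word in text for word in ['building', 'construction', 'illegal']):
--         return 'Building'
--     else:
--         return 'General'
-- ===== SOURCE B (Python) =====
-- _RULES = [
--     (['road', 'pothole', 'street', 'pavement'], 'Public Works'),
--     (['water', 'leak', 'pipe', 'supply'], 'Water Supply'),
--     (['garbage', 'trash', 'waste', 'cleanliness'], 'Sanitation'),
--     (['light', 'streetlight', 'electricity', 'lamp'], 'Electrical'),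
--     (['drainage', 'sewer', 'flood', 'manhole'], 'Drainage'),
--     (['park', 'garden', 'playground'], 'Parks'),
--     (['health', 'mosquito', 'disease'], 'Health'),
--     (['building', 'construction', 'illegal'], 'Building'),
-- ]
--
-- _DEPTS = [dept for _, dept in _RULES] + ['General']
--
-- # flat keyword -> priority table; no grouping, no rule-order short circuit at query time
-- _KEYWORD_PRI = [(w, i) for i, (ws, _) in enumerate(_RULES) for w in ws]
--
--
-- def _detect_department(text):
--     """Detect department from text"""
--     best = len(_RULES)
--     for word, pri in _KEYWORD_PRI:
--         if word in text:
--             best = min(best, pri)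
--     return _DEPTS[best]
-- ===== Notes on version B (the rewrite author's own statement) =====
-- stated objective: alternative
-- what changed: Instead of testing rule groups in priority order with early return, B scans the flat keyword->priority table once, keeps the minimum matched priority in an accumulator, and indexes a department array with it at the end (no short-circuit, no per-rule any()).
import Mathlib
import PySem

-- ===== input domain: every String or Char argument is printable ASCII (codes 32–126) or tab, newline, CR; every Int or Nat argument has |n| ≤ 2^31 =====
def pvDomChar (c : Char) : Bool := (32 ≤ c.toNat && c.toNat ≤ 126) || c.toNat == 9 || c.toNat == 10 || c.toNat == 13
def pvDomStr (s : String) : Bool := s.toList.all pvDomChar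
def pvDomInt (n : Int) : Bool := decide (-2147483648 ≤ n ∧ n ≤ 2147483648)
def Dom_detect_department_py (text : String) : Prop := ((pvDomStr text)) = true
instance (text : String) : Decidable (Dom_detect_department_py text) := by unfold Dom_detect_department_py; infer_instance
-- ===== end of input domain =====

-- B replaces A's priority-ordered early-return cascade by one flat scan over a keyword->priority
-- table keeping the minimum matched priority, then indexes a department array (alternative, same cost).

-- ===== PORT A =====
def detect_department_py (text : String) : String :=
  if ["road", "pothole", "street", "pavement"].any (fun w => PySem.Str.isIn w text) then
    "Public Works"
  else if ["water", "leak", "pipe", "supply"].any (fun w => PySem.Str.isIn w text) then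
    "Water Supply"
  else if ["garbage", "trash", "waste", "cleanliness"].any (fun w => PySem.Str.isIn w text) then
    "Sanitation"
  else if ["light", "streetlight", "electricity", "lamp"].any (fun w => PySem.Str.isIn w text) then
    "Electrical"
  else if ["drainage", "sewer", "flood", "manhole"].any (fun w => PySem.Str.isIn w text) then
    "Drainage"
  else if ["park", "garden", "playground"].any (fun w => PySem.Str.isIn w text) then
    "Parks"
  else if ["health", "mosquito", "disease"].any (fun w => PySem.Str.isIn w text) then
    "Health"
  else if ["building", "construction", "illegal"].any (fun w => PySem.Str.isIn w text) then
    "Building"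
  else
    "General"

-- ===== PORT B =====
-- _DEPTS: rule departments in order, then the default
def pvDepts : List String :=
  ["Public Works", "Water Supply", "Sanitation", "Electrical",
   "Drainage", "Parks", "Health", "Building", "General"]

-- _KEYWORD_PRI: flat keyword -> priority table
def pvKeywordPri : List (String × Nat) :=
  [("road", 0), ("pothole", 0), ("street", 0), ("pavement", 0),
   ("water", 1), ("leak", 1), ("pipe", 1), ("supply", 1),
   ("garbage", 2), ("trash", 2), ("waste", 2), ("cleanliness", 2),
   ("light", 3), ("streetlight", 3), ("electricity", 3), ("lamp", 3),
   ("drainage", 4), ("sewer", 4), ("flood", 4), ("manhole", 4),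
   ("park", 5), ("garden", 5), ("playground", 5),
   ("health", 6), ("mosquito", 6), ("disease", 6),
   ("building", 7), ("construction", 7), ("illegal", 7)]

def detect_department_py_alt (text : String) : String :=
  let best := pvKeywordPri.foldl
    (fun acc wp => if PySem.Str.isIn wp.1 text then min acc wp.2 else acc) 8
  pvDepts.getD best "General"

-- ===== PRECONDITION & SPEC =====
def Spec_detect_department_py (text : String) (out : String) : Prop := out = detect_department_py_alt text
instance (text : String) (out : String) : Decidable (Spec_detect_department_py text out) := by unfold Spec_detect_department_py; infer_instance

-- ===== CLAIM (what is proved, stated in full; the proofs are below) =====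
def Claim_equal_detect_department_py : Prop := ∀ (text : String), Dom_detect_department_py text → Spec_detect_department_py text (detect_department_py text)

-- ===== LEMMAS AND PROOFS =====

-- folding the min-accumulator over one group of keywords with a common priority p
theorem pv_foldl_group (text : String) (ws : List String) (p : Nat) (acc : Nat) :
    List.foldl (fun acc wp => if PySem.Str.isIn wp.1 text then min acc wp.2 else acc) acc
      (ws.map (fun w => (w, p)))
    = if ws.any (fun w => PySem.Str.isIn w text) then min acc p else acc := by
  induction ws generalizing acc with
  | nil => simp
  | cons h t ih =>
    simp only [List.map, List.foldl, List.any_cons, ih]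
    by_cases hh : PySem.Str.isIn h text = true <;>
      by_cases ht : (t.any fun w => PySem.Str.isIn w text) = true <;>
        simp_all

-- the flat table is the concatenation of the per-priority groups
theorem pv_table_eq : pvKeywordPri =
    (["road", "pothole", "street", "pavement"].map (fun w => (w, 0)))
    ++ ((["water", "leak", "pipe", "supply"].map (fun w => (w, 1)))
    ++ ((["garbage", "trash", "waste", "cleanliness"].map (fun w => (w, 2)))
    ++ ((["light", "streetlight", "electricity", "lamp"].map (fun w => (w, 3)))
    ++ ((["drainage", "sewer", "flood", "manhole"].map (fun w => (w, 4)))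
    ++ ((["park", "garden", "playground"].map (fun w => (w, 5)))
    ++ ((["health", "mosquito", "disease"].map (fun w => (w, 6)))
    ++ (["building", "construction", "illegal"].map (fun w => (w, 7))))))))) := rfl

-- ===== VERDICT (by name: the statement is the Claim_ definition above) =====
set_option maxHeartbeats 1000000 in
theorem detect_department_py_spec : Claim_equal_detect_department_py := by
  intro text _
  unfold Spec_detect_department_py
  simp only [detect_department_py, detect_department_py_alt]
  rw [pv_table_eq]
  rw [List.foldl_append, List.foldl_append, List.foldl_append, List.foldl_append,
      List.foldl_append, List.foldl_append, List.foldl_append]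
  rw [pv_foldl_group, pv_foldl_group, pv_foldl_group, pv_foldl_group,
      pv_foldl_group, pv_foldl_group, pv_foldl_group, pv_foldl_group]
  by_cases c0 : (["road", "pothole", "street", "pavement"].any fun w => PySem.Str.isIn w text) = true <;>
  by_cases c1 : (["water", "leak", "pipe", "supply"].any fun w => PySem.Str.isIn w text) = true <;>
  by_cases c2 : (["garbage", "trash", "waste", "cleanliness"].any fun w => PySem.Str.isIn w text) = true <;>
  by_cases c3 : (["light", "streetlight", "electricity", "lamp"].any fun w => PySem.Str.isIn w text) = true <;>
  by_cases c4 : (["drainage", "sewer", "flood", "manhole"].any fun w => PySem.Str.isIn w text) = true <;>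
  by_cases c5 : (["park", "garden", "playground"].any fun w => PySem.Str.isIn w text) = true <;>
  by_cases c6 : (["health", "mosquito", "disease"].any fun w => PySem.Str.isIn w text) = true <;>
  by_cases c7 : (["building", "construction", "illegal"].any fun w => PySem.Str.isIn w text) = true <;>
  simp only [if_pos, c0, c1, c2, c3, c4, c5, c6, c7] <;> rfl
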